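-- pv_equiv track=rewrite | github.com/nansencenter/DAPPER | dapper/dict_tools.py | transpose_list_of_dicts
-- ===== SOURCE A (Python) =====
-- def transpose_list_of_dicts(LD, safe=True):
--     """
--
--     Example:
--     >>> LD = [{chr(97+j):j for j in range(2)} for i in range(3)]
--     >>> LD
--     [{'a': 0, 'b': 1}, {'a': 0, 'b': 1}, {'a': 0, 'b': 1}]
--     >>> transpose_list_of_dicts(LD)
--     {'a': [0, 0, 0], 'b': [1, 1, 1]}
--     """
--     new = {}
--     prev = "UNINITIALIZED"
--     for i, D in enumerate(LD):
--
--         # Validate column keys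
--         if safe and prev != "UNINITIALIZED":
--             assert prev == D.keys(), f"Key mismatch for dict number {i}"
--         prev = D.keys()
--
--         for j in D:
--             new.setdefault(j, []).append(D[j])
--
--     return new
-- ===== SOURCE B (Python) =====
-- def transpose_list_of_dicts(LD, safe=True):
--     if safe:
--         for i in range(1, len(LD)):
--             assert LD[i - 1].keys() == LD[i].keys(), f"Key mismatch for dict number {i}"
--     keys = []
--     seen = set()
--     for D in LD:
--         for k in D:
--             if k not in seen:
--                 seen.add(k)
--                 keys.append(k)
--     return {k: [D[k] for D in LD if k in D] for k in keys}
-- ===== Notes on version B (the rewrite author's own statement) =====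
-- stated objective: alternative
-- what changed: A makes one accumulating pass over the dicts, growing each value list with setdefault+append; B first collects the key order (first appearance) and then builds the result by a per-key scan of LD, one comprehension pass per key, with key validation hoisted into a separate up-front pass.
import Mathlib
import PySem

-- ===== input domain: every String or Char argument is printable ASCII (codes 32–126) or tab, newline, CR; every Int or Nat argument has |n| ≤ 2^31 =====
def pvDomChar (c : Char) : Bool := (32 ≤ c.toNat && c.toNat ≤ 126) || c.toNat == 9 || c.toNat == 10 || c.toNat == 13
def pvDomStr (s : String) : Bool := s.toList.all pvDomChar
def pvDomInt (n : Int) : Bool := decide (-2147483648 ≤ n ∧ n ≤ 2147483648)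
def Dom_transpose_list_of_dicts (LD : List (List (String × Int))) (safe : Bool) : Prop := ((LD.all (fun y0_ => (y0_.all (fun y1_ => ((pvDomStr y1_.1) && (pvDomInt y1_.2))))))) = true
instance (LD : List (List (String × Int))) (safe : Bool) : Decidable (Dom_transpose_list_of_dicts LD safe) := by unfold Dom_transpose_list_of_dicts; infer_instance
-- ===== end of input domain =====

-- B replaces A's single accumulating setdefault/append pass by a first-appearance key pass plus one scan of LD per key (same cost class, different decomposition).

-- ===== PORT A =====
-- A's assert only fires outside Pre_ (safe with mismatched consecutive key sets), so the port carries the accumulation loop only.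
def transpose_list_of_dicts (LD : List (List (String × Int))) (safe : Bool) : List (String × List Int) :=
  (LD.foldl
    (fun new D => D.foldl (fun new p => new.modify p.1 [] (fun v => v ++ [p.2])) new)
    PySem.Dict.empty).items

-- ===== PORT B =====
-- B's validation pass likewise only raises outside Pre_; 'seen'+'keys' of Source B is the ordered-set idiom, ported as PySem.Set.add.
def transpose_list_of_dicts_alt (LD : List (List (String × Int))) (safe : Bool) : List (String × List Int) :=
  let keys : List String := LD.foldl (fun ks D => D.foldl (fun ks p => PySem.Set.add ks p.1) ks) []
  keys.map (fun k => (k, LD.filterMap (fun D => (PySem.Dict.mk D).get? k)))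

-- ===== PRECONDITION & SPEC =====
-- Pre_ excludes inputs where A raises AssertionError (safe = true with consecutive dicts of unequal key sets),
-- and inner lists with duplicate keys, which cannot arise from a Python dict (the type this list encodes).
def Pre_transpose_list_of_dicts (LD : List (List (String × Int))) (safe : Bool) : Prop :=
  (∀ D ∈ LD, (D.map Prod.fst).Nodup) ∧
  (safe = true → ((LD.zip LD.tail).all (fun q =>
      (q.1.map Prod.fst).all (fun s => (q.2.map Prod.fst).contains s) &&
      (q.2.map Prod.fst).all (fun s => (q.1.map Prod.fst).contains s))) = true)
instance (LD : List (List (String × Int))) (safe : Bool) : Decidable (Pre_transpose_list_of_dicts LD safe) := by unfold Pre_transpose_list_of_dicts; infer_instance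
def pvWitness_transpose_list_of_dicts : (List (List (String × Int))) × Bool :=
  ([[("a", 1), ("b", 2)], [("b", 3), ("a", 4)]], true)

def Spec_transpose_list_of_dicts (LD : List (List (String × Int))) (safe : Bool) (out : List (String × List Int)) : Prop := out = transpose_list_of_dicts_alt LD safe
instance (LD : List (List (String × Int))) (safe : Bool) (out : List (String × List Int)) : Decidable (Spec_transpose_list_of_dicts LD safe out) := by unfold Spec_transpose_list_of_dicts; infer_instance

-- ===== CLAIM (what is proved, stated in full; the proofs are below) =====
def Claim_equal_transpose_list_of_dicts : Prop := ∀ (LD : List (List (String × Int))) (safe : Bool), Dom_transpose_list_of_dicts LD safe → Pre_transpose_list_of_dicts LD safe → Spec_transpose_list_of_dicts LD safe (transpose_list_of_dicts LD safe)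

-- ===== LEMMAS AND PROOFS =====

-- One dict with distinct keys: filtering its pairs by key = the (≤ 1) result of a dict lookup.
theorem pv_per_dict (k : String) (D : List (String × Int)) (h : (D.map Prod.fst).Nodup) :
    (D.filter (fun p => p.1 == k)).map (fun p => p.2) = ((PySem.Dict.mk D).get? k).toList := by
  induction D with
  | nil => simp [PySem.Dict.get?]
  | cons a rest ih =>
    simp only [List.map_cons, List.nodup_cons] at h
    rw [PySem.Dict.get?_mk_cons, List.filter_cons]
    by_cases hk : (a.1 == k) = true
    · have hk' : a.1 = k := by simpa using hk
      have hrest : rest.filter (fun p => p.1 == k) = [] := by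
        rw [List.filter_eq_nil_iff]
        intro p hp hb
        have hpk : p.1 = k := by simpa using hb
        apply h.1
        rw [hk', ← hpk]
        exact List.mem_map_of_mem hp
      simp [hk, hrest]
    · have hkf : (a.1 == k) = false := by simpa using hk
      simp [hkf, ih h.2]

-- B's per-key scan of LD = the flat filter of all pairs at that key.
theorem pv_values (k : String) (LD : List (List (String × Int)))
    (h : ∀ D ∈ LD, (D.map Prod.fst).Nodup) :
    LD.filterMap (fun D => (PySem.Dict.mk D).get? k)
      = (LD.flatten.filter (fun p => p.1 == k)).map (fun p => p.2) := by
  induction LD with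
  | nil => simp
  | cons D LD' ih =>
    have hD := pv_per_dict k D (h D (by simp))
    have hrest := ih (fun D hD => h D (List.mem_cons_of_mem _ hD))
    rw [List.flatten_cons, List.filter_append, List.map_append, ← hrest, hD,
      List.filterMap_cons]
    cases hg : (PySem.Dict.mk D).get? k <;> simp [hg]

-- ===== VERDICT (by name: the statement is the Claim_ definition above) =====
theorem transpose_list_of_dicts_spec : Claim_equal_transpose_list_of_dicts := by
  intro LD safe _ hpre
  unfold Spec_transpose_list_of_dicts transpose_list_of_dicts transpose_list_of_dicts_alt
  rw [← List.foldl_flatten, ← List.foldl_flatten]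
  have hnd : (List.foldl (fun d p => d.modify p.1 [] (fun v => v ++ [p.2]))
      PySem.Dict.empty LD.flatten).keys.Nodup :=
    PySem.Dict.nodup_keys_foldl_modify_key LD.flatten Prod.fst [] (fun _ p v => v ++ [p.2]) _
      (by simp)
  rw [PySem.Dict.items_eq_map_keys _ hnd []]
  have hkeys : (List.foldl (fun d p => d.modify p.1 [] (fun v => v ++ [p.2]))
      PySem.Dict.empty LD.flatten).keys
      = List.foldl (fun ks p => PySem.Set.add ks p.1) [] LD.flatten := by
    rw [PySem.Dict.keys_foldl_modify_key LD.flatten Prod.fst [] (fun _ p v => v ++ [p.2]),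
      ← PySem.Set.update_map_eq_foldl_add]
    simp [PySem.Dict.keys_empty]
  rw [hkeys]
  apply List.map_congr_left
  intro k _
  rw [PySem.Dict.getD_foldl_modify_append, PySem.Dict.getD_empty,
    pv_values k LD hpre.1]
  simp
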